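-- pv_equiv track=rewrite | github.com/popslovesmusic/mbc | hgg_index/metrics_export.py | _directory_stats
-- ===== SOURCE A (Python) =====
-- from typing import List, Dict
--
-- def _directory_stats(cards: List[Dict]) -> Dict:
--     """Stats by directory"""
--     by_dir = {}
--
--     for card in cards:
--         source = card['source']
--         directory = source.split('\\')[0] if '\\' in source else source.split('/')[0]
--
--         if directory not in by_dir:
--             by_dir[directory] = {
--                 'total': 0,
--                 'formal': 0,
--                 'technical': 0,
--                 'contradictions': 0,
--                 'definitive': 0
--             }
--
--         by_dir[directory]['total'] += 1
--         if card.get('is_formal'):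
--             by_dir[directory]['formal'] += 1
--         if card.get('is_technical'):
--             by_dir[directory]['technical'] += 1
--         if card.get('has_contradictions'):
--             by_dir[directory]['contradictions'] += 1
--         if card.get('is_definitive'):
--             by_dir[directory]['definitive'] += 1
--
--     return by_dir
-- ===== SOURCE B (Python) =====
-- from typing import List, Dict
--
-- def _directory_stats(cards: List[Dict]) -> Dict:
--     """Stats by directory: partition cards into per-directory groups first, then count each group."""
--     groups = {}
--     for card in cards:
--         source = card['source']
--         directory = source.split('\\')[0] if '\\' in source else source.split('/')[0]
--         groups.setdefault(directory, []).append(card)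
--     return {
--         directory: {
--             'total': len(group),
--             'formal': sum(1 for c in group if c.get('is_formal')),
--             'technical': sum(1 for c in group if c.get('is_technical')),
--             'contradictions': sum(1 for c in group if c.get('has_contradictions')),
--             'definitive': sum(1 for c in group if c.get('is_definitive')),
--         }
--         for directory, group in groups.items()
--     }
-- ===== Notes on version B (the rewrite author's own statement) =====
-- stated objective: alternative
-- what changed: B separates partitioning from counting: one pass groups whole cards by their source directory, then each group is summarized with len() and per-flag 1-sums, instead of A's interleaved conditional counter increments inside the single loop.
import Mathlib
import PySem

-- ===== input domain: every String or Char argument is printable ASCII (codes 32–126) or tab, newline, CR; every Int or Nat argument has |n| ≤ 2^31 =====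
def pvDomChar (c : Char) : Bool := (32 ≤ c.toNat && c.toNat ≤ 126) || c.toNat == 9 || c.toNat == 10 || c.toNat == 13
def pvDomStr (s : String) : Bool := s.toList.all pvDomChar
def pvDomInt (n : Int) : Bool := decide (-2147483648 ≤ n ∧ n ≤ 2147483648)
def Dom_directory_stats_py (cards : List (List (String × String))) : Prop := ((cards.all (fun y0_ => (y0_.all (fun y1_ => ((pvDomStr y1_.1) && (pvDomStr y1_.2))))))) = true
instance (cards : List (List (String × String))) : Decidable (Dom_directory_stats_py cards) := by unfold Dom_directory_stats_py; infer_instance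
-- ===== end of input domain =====

-- B separates partitioning (group cards by directory) from counting (summarize each group); alternative decomposition, same cost.
-- Shared helpers (the identical sub-expressions both Pythons contain): first-match dict lookup,
-- string truthiness of .get, and the directory-splitting expression.
def pvCardGet (card : List (String × String)) (k : String) : Option String :=
  (card.find? (fun p => p.1 == k)).map (·.2)

def pvTruthy (card : List (String × String)) (k : String) : Bool :=
  match pvCardGet card k with
  | some v => !v.toList.isEmpty
  | none => false

def pvDir (source : String) : String :=
  if PySem.Str.isIn "\\" source then ((PySem.Str.split? source "\\").getD []).getD 0 ""
  else ((PySem.Str.split? source "/").getD []).getD 0 ""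

-- ===== PORT A =====
def pvAStep (by_dir : PySem.Dict String (PySem.Dict String Int)) (card : List (String × String)) :
    PySem.Dict String (PySem.Dict String Int) :=
  let source := (pvCardGet card "source").getD ""   -- KeyError (missing 'source') excluded by Pre_
  let directory := pvDir source
  let bd := if by_dir.contains directory then by_dir
            else by_dir.insert directory (PySem.Dict.ofList
              [("total", (0:Int)), ("formal", 0), ("technical", 0), ("contradictions", 0), ("definitive", 0)])
  let bd := bd.modify directory PySem.Dict.empty (fun c => c.modify "total" 0 (· + 1))
  let bd := if pvTruthy card "is_formal" then bd.modify directory PySem.Dict.empty (fun c => c.modify "formal" 0 (· + 1)) else bd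
  let bd := if pvTruthy card "is_technical" then bd.modify directory PySem.Dict.empty (fun c => c.modify "technical" 0 (· + 1)) else bd
  let bd := if pvTruthy card "has_contradictions" then bd.modify directory PySem.Dict.empty (fun c => c.modify "contradictions" 0 (· + 1)) else bd
  let bd := if pvTruthy card "is_definitive" then bd.modify directory PySem.Dict.empty (fun c => c.modify "definitive" 0 (· + 1)) else bd
  bd

def directory_stats_py (cards : List (List (String × String))) : List (String × List (String × Int)) :=
  (cards.foldl pvAStep PySem.Dict.empty).items.map (fun p => (p.1, p.2.items))

-- ===== PORT B =====
def pvCount (g : List (List (String × String))) (k : String) : Int :=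
  (g.map (fun c => if pvTruthy c k then (1:Int) else 0)).sum

def pvCountsList (g : List (List (String × String))) : List (String × Int) :=
  [("total", (g.length : Int)), ("formal", pvCount g "is_formal"), ("technical", pvCount g "is_technical"),
   ("contradictions", pvCount g "has_contradictions"), ("definitive", pvCount g "is_definitive")]

def directory_stats_py_alt (cards : List (List (String × String))) : List (String × List (String × Int)) :=
  let groups := cards.foldl (fun g card =>
      let source := (pvCardGet card "source").getD ""
      let directory := pvDir source
      g.modify directory [] (fun l => l ++ [card])) PySem.Dict.empty
  groups.items.map (fun p => (p.1, pvCountsList p.2))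

-- ===== PRECONDITION & SPEC =====
-- Pre_ excludes exactly the cards without a 'source' key, on which A raises KeyError.
def Pre_directory_stats_py (cards : List (List (String × String))) : Prop :=
  ∀ card ∈ cards, (card.any (fun p => p.1 == "source")) = true
instance (cards : List (List (String × String))) : Decidable (Pre_directory_stats_py cards) := by
  unfold Pre_directory_stats_py; infer_instance
def pvWitness_directory_stats_py : (List (List (String × String))) :=
  [[("source", "a/b"), ("is_formal", "1")], [("source", "a\\c")]]

def Spec_directory_stats_py (cards : List (List (String × String))) (out : List (String × List (String × Int))) : Prop := out = directory_stats_py_alt cards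
instance (cards : List (List (String × String))) (out : List (String × List (String × Int))) : Decidable (Spec_directory_stats_py cards out) := by unfold Spec_directory_stats_py; infer_instance

-- ===== CLAIM (what is proved, stated in full; the proofs are below) =====
def Claim_equal_directory_stats_py : Prop := ∀ (cards : List (List (String × String))), Dom_directory_stats_py cards → Pre_directory_stats_py cards → Spec_directory_stats_py cards (directory_stats_py cards)

-- ===== LEMMAS AND PROOFS =====
def pvDirOfCard (card : List (String × String)) : String :=
  pvDir ((pvCardGet card "source").getD "")

def pvCounts (g : List (List (String × String))) : PySem.Dict String Int :=
  PySem.Dict.mk (pvCountsList g)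

def pvC (g : PySem.Dict String (List (List (String × String)))) : PySem.Dict String (PySem.Dict String Int) :=
  PySem.Dict.mk (g.items.map (fun p => (p.1, pvCounts p.2)))

def pvGStep (g : PySem.Dict String (List (List (String × String)))) (card : List (String × String)) :
    PySem.Dict String (List (List (String × String))) :=
  g.modify (pvDirOfCard card) [] (fun l => l ++ [card])

lemma pvZeros_eq : (PySem.Dict.ofList
    [("total", (0:Int)), ("formal", 0), ("technical", 0), ("contradictions", 0), ("definitive", 0)]) = pvCounts [] := by
  rfl

-- the chain of inner-dict updates one card causes
def pvUpd (card : List (String × String)) (c : PySem.Dict String Int) : PySem.Dict String Int :=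
  let c := c.modify "total" 0 (· + 1)
  let c := if pvTruthy card "is_formal" then c.modify "formal" 0 (· + 1) else c
  let c := if pvTruthy card "is_technical" then c.modify "technical" 0 (· + 1) else c
  let c := if pvTruthy card "has_contradictions" then c.modify "contradictions" 0 (· + 1) else c
  if pvTruthy card "is_definitive" then c.modify "definitive" 0 (· + 1) else c

lemma pvAStep_collapse (bd : PySem.Dict String (PySem.Dict String Int)) (card : List (String × String)) :
    pvAStep bd card =
      (let dir := pvDirOfCard card
       let bd0 := if bd.contains dir then bd else bd.insert dir (pvCounts [])
       bd0.insert dir (pvUpd card (bd0.getD dir PySem.Dict.empty))) := by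
  unfold pvAStep pvUpd pvDirOfCard
  rw [pvZeros_eq]
  split_ifs <;>
    simp [PySem.Dict.modify, PySem.Dict.getD_insert_self, PySem.Dict.insert_insert_self]

lemma pvUpd_counts (card : List (String × String)) (g : List (List (String × String))) :
    pvUpd card (pvCounts g) = pvCounts (g ++ [card]) := by
  unfold pvUpd pvCounts pvCountsList pvCount
  split_ifs <;>
    simp [PySem.Dict.modify, PySem.Dict.insert, PySem.Dict.contains, PySem.Dict.getD,
      PySem.Dict.get?, List.sum_append, *]

lemma pvC_contains (g : PySem.Dict String (List (List (String × String)))) (k : String) :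
    (pvC g).contains k = g.contains k := by
  simp [pvC, PySem.Dict.contains, List.any_map, Function.comp_def]

lemma pvC_get? (g : PySem.Dict String (List (List (String × String)))) (k : String) :
    (pvC g).get? k = (g.get? k).map pvCounts := by
  obtain ⟨l⟩ := g
  induction l with
  | nil => rfl
  | cons p rest ih =>
    by_cases h : p.1 = k
    · simp [pvC, PySem.Dict.get?, h]
    · simpa [pvC, PySem.Dict.get?, h] using ih

lemma pvC_insert (g : PySem.Dict String (List (List (String × String)))) (k : String)
    (v : List (List (String × String))) :
    pvC (g.insert k v) = (pvC g).insert k (pvCounts v) := by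
  have hc := pvC_contains g k
  by_cases h : g.contains k = true
  · simp only [PySem.Dict.insert, h, hc, if_pos]
    simp only [pvC, List.map_map]
    congr 1
    apply List.map_congr_left
    intro p _
    by_cases hp : p.1 = k <;> simp [hp]
  · simp only [PySem.Dict.insert, hc, h, if_neg, Bool.not_eq_true]
    simp [pvC]

lemma pvStep (g : PySem.Dict String (List (List (String × String)))) (card : List (String × String)) :
    pvAStep (pvC g) card = pvC (pvGStep g card) := by
  rw [pvAStep_collapse]
  show (let bd0 := if (pvC g).contains (pvDirOfCard card) then pvC g
          else (pvC g).insert (pvDirOfCard card) (pvCounts []);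
        bd0.insert (pvDirOfCard card) (pvUpd card (bd0.getD (pvDirOfCard card) PySem.Dict.empty))) = _
  rw [pvGStep, PySem.Dict.modify, pvC_insert]
  by_cases h : g.contains (pvDirOfCard card) = true
  · obtain ⟨v, hv⟩ : ∃ v, g.get? (pvDirOfCard card) = some v := by
      rcases hg : g.get? (pvDirOfCard card) with _ | v
      · rw [PySem.Dict.get?_eq_none_iff_contains] at hg; simp [h] at hg
      · exact ⟨v, rfl⟩
    simp only [pvC_contains, h, if_pos, PySem.Dict.getD, pvC_get?, hv, Option.map_some,
      Option.getD_some, pvUpd_counts]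
  · have hg : g.get? (pvDirOfCard card) = none := by
      rcases hg : g.get? (pvDirOfCard card) with _ | v
      · rfl
      · exact absurd (by simp [PySem.Dict.contains_eq_isSome_get?, hg]) h
    simp only [pvC_contains, h, if_neg, Bool.not_eq_true, PySem.Dict.get?_insert_self,
      Option.getD_some, PySem.Dict.insert_insert_self, pvUpd_counts, PySem.Dict.getD, hg,
      Option.getD_none, List.nil_append]

lemma pvMain (cards : List (List (String × String))) :
    cards.foldl pvAStep PySem.Dict.empty = pvC (cards.foldl pvGStep PySem.Dict.empty) := by
  induction cards using List.reverseRecOn with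
  | nil => rfl
  | append_singleton xs x ih => simp [List.foldl_append, ih, pvStep]

-- ===== VERDICT (by name: the statement is the Claim_ definition above) =====
theorem directory_stats_py_spec : Claim_equal_directory_stats_py := by
  intro cards _ _
  show directory_stats_py cards = directory_stats_py_alt cards
  unfold directory_stats_py directory_stats_py_alt
  rw [pvMain]
  show (pvC _).items.map _ = _
  rw [show (fun (g : PySem.Dict String (List (List (String × String)))) card =>
      let source := (pvCardGet card "source").getD ""
      let directory := pvDir source
      g.modify directory [] (fun l => l ++ [card])) = pvGStep from rfl]
  simp [pvC, pvCounts]
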